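-- pv_equiv track=rewrite | github.com/miafuentes30/Lab6Teoria | serie4.py | in_L5
-- ===== SOURCE A (Python) =====
-- def in_L5(w: str) -> bool:
--     # Debe ser 0^a 1^b 2^c con a=b=c.
--     i = 0
--     n = len(w)
--     while i < n and w[i] == '0':
--         i += 1
--     a = i
--     j = i
--     while j < n and w[j] == '1':
--         j += 1
--     b = j - i
--     k = j
--     while k < n and w[k] == '2':
--         k += 1
--     c = k - j
--     # Debe consumir todo y tener a=b=c
--     return k == n and a == b == c
-- ===== SOURCE B (Python) =====
-- def in_L5(w: str) -> bool:
--     k, r = divmod(len(w), 3)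
--     return r == 0 and w == '0' * k + '1' * k + '2' * k
-- ===== Notes on version B (the rewrite author's own statement) =====
-- stated objective: simpler
-- what changed: Replaces the three manual while-loop scans with a construct-and-compare: build the unique candidate word '0'*k+'1'*k+'2'*k for k=len(w)//3 and compare it to w.
import Mathlib
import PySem

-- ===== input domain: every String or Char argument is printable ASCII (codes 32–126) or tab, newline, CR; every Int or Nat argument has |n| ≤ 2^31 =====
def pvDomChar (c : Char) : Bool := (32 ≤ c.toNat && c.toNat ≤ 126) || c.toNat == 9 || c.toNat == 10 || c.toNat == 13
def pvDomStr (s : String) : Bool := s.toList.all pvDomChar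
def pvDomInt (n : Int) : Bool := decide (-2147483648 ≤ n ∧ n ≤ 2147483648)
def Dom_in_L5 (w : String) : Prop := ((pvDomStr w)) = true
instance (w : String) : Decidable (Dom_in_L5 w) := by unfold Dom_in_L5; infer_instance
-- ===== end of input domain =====

-- B checks membership in 0^a1^b2^c (a=b=c) by building the unique candidate of w's length and comparing; same cost, simpler than A's three while-loops.

-- ===== PORT A =====
-- each 'while i < n and w[i] == c: i += 1' advances over the maximal run of c; ported as the run length of c at the current suffix
def runLen (c : Char) : List Char → Nat
  | [] => 0
  | x :: xs => if x = c then runLen c xs + 1 else 0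

def in_L5 (w : String) : Bool :=
  let l := w.toList
  let n := l.length
  let a := runLen '0' l
  let r1 := l.drop a
  let b := runLen '1' r1
  let r2 := r1.drop b
  let c := runLen '2' r2
  decide (a + b + c = n) && decide (a = b) && decide (b = c)

-- ===== PORT B =====
def in_L5_alt (w : String) : Bool :=
  let l := w.toList
  let k := l.length / 3
  decide (l.length % 3 = 0) &&
    decide (l = List.replicate k '0' ++ List.replicate k '1' ++ List.replicate k '2')

-- ===== PRECONDITION & SPEC =====
def Spec_in_L5 (w : String) (out : Bool) : Prop := out = in_L5_alt w
instance (w : String) (out : Bool) : Decidable (Spec_in_L5 w out) := by unfold Spec_in_L5; infer_instance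

-- ===== CLAIM (what is proved, stated in full; the proofs are below) =====
def Claim_equal_in_L5 : Prop := ∀ (w : String), Dom_in_L5 w → Spec_in_L5 w (in_L5 w)

-- ===== LEMMAS AND PROOFS =====

theorem decomp_runLen (c : Char) (l : List Char) :
    l = List.replicate (runLen c l) c ++ l.drop (runLen c l) := by
  induction l with
  | nil => rfl
  | cons x xs ih =>
    by_cases h : x = c
    · subst h
      simp only [runLen]
      exact congrArg _ ih
    · simp [runLen, h]

theorem runLen_replicate_append (c : Char) (k : Nat) (rest : List Char)
    (h : ∀ x ∈ rest.head?, x ≠ c) :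
    runLen c (List.replicate k c ++ rest) = k := by
  induction k with
  | zero =>
    simp only [List.replicate_zero, List.nil_append]
    cases rest with
    | nil => rfl
    | cons y ys =>
      have : y ≠ c := h y (by simp)
      simp [runLen, this]
  | succ n ih => simp [List.replicate_succ, runLen, ih]

theorem in_L5_true_iff (w : String) :
    in_L5 w = true ↔ ∃ k, w.toList =
      List.replicate k '0' ++ List.replicate k '1' ++ List.replicate k '2' := by
  constructor
  · intro h
    simp only [in_L5, Bool.and_eq_true, decide_eq_true_eq] at h
    obtain ⟨⟨hn, hab⟩, hbc⟩ := h
    set l := w.toList with hl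
    set a := runLen '0' l with ha
    set r1 := l.drop a with hr1
    set b := runLen '1' r1 with hb
    set r2 := r1.drop b with hr2
    set c := runLen '2' r2 with hc
    refine ⟨a, ?_⟩
    have d0 : l = List.replicate a '0' ++ r1 := decomp_runLen '0' l
    have d1 : r1 = List.replicate b '1' ++ r2 := decomp_runLen '1' r1
    have d2 : r2 = List.replicate c '2' ++ r2.drop c := decomp_runLen '2' r2
    have hlen : l.length = a + r1.length := by rw [d0]; simp
    have hlen1 : r1.length = b + r2.length := by rw [d1]; simp
    have hlen2 : r2.length = c + (r2.drop c).length := by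
      conv_lhs => rw [d2]
      simp
    have : (r2.drop c).length = 0 := by omega
    have hnil : r2.drop c = [] := List.length_eq_zero_iff.mp this
    rw [d0, d1, d2, hnil]
    rw [← hab, ← hbc, ← hab]
    simp [List.append_assoc]
  · rintro ⟨k, hw⟩
    simp only [in_L5, Bool.and_eq_true, decide_eq_true_eq]
    set l := w.toList with hl
    have ha : runLen '0' l = k := by
      rw [hw, List.append_assoc]
      apply runLen_replicate_append
      intro x hx
      cases k with
      | zero => simp at hx
      | succ n =>
        simp [List.replicate_succ] at hx
        subst hx; decide
    have hr1 : l.drop k = List.replicate k '1' ++ List.replicate k '2' := by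
      rw [hw, List.append_assoc, List.drop_append_of_le_length (by simp)]
      simp
    have hb : runLen '1' (List.replicate k '1' ++ List.replicate k '2') = k := by
      apply runLen_replicate_append
      intro x hx
      cases k with
      | zero => simp at hx
      | succ n =>
        simp [List.replicate_succ] at hx
        subst hx; decide
    have hr2 : (List.replicate k '1' ++ List.replicate k '2').drop k
        = List.replicate k '2' := by
      rw [List.drop_append_of_le_length (by simp)]
      simp
    have hc : runLen '2' (List.replicate k '2') = k := by
      have := runLen_replicate_append '2' k [] (by simp)
      simp at this; exact this
    have hlen : l.length = 3 * k := by rw [hw]; simp; ring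
    refine ⟨⟨?_, ?_⟩, ?_⟩ <;> simp only [ha, hr1, hb, hr2, hc, hlen] <;> omega

theorem in_L5_alt_true_iff (w : String) :
    in_L5_alt w = true ↔ ∃ k, w.toList =
      List.replicate k '0' ++ List.replicate k '1' ++ List.replicate k '2' := by
  simp only [in_L5_alt, Bool.and_eq_true, decide_eq_true_eq]
  constructor
  · rintro ⟨-, h⟩; exact ⟨_, h⟩
  · rintro ⟨k, hw⟩
    have hlen : w.toList.length = 3 * k := by rw [hw]; simp; ring
    have hk : w.toList.length / 3 = k := by omega
    refine ⟨by omega, by rw [hk]; exact hw⟩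

-- ===== VERDICT (by name: the statement is the Claim_ definition above) =====
theorem in_L5_spec : Claim_equal_in_L5 := by
  intro w _
  unfold Spec_in_L5
  rcases h : in_L5_alt w
  · rcases h2 : in_L5 w
    · rfl
    · exact absurd ((in_L5_alt_true_iff w).mpr ((in_L5_true_iff w).mp h2)) (by simp [h])
  · exact (in_L5_true_iff w).mpr ((in_L5_alt_true_iff w).mp h)
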